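-- pv_equiv track=rewrite | github.com/agnesnatasya/2048-Game | sidequest10.1-template.py | score_increment
-- ===== SOURCE A (Python) =====
-- def flatten(mat):
--     return [num for row in mat for num in row]
--
-- def score_increment(matPrev, matFinal):
--     first = flatten(matPrev)
--     second = flatten(matFinal)
--     for i in second:
--         if i in first and i!=0:
--             first.remove(i)
--     sumf = 0
--     for i in first:
--         sumf += i
--     return sumf
-- ===== SOURCE B (Python) =====
-- def score_increment(matPrev, matFinal):
--     prev = sorted(num for row in matPrev for num in row)
--     fin = sorted(num for row in matFinal for num in row)
--     total = 0
--     i = j = 0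
--     while i < len(prev) and j < len(fin):
--         if prev[i] < fin[j]:
--             total += prev[i]
--             i += 1
--         elif prev[i] == fin[j]:
--             i += 1
--             j += 1
--         else:
--             j += 1
--     while i < len(prev):
--         total += prev[i]
--         i += 1
--     return total
-- ===== Notes on version B (the rewrite author's own statement) =====
-- stated objective: faster
-- what changed: Sorts both flattened matrices and runs a single two-pointer merge that skips matched pairs and sums unmatched prev values, instead of A's per-entry membership scan and list.remove.
import Mathlib
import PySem

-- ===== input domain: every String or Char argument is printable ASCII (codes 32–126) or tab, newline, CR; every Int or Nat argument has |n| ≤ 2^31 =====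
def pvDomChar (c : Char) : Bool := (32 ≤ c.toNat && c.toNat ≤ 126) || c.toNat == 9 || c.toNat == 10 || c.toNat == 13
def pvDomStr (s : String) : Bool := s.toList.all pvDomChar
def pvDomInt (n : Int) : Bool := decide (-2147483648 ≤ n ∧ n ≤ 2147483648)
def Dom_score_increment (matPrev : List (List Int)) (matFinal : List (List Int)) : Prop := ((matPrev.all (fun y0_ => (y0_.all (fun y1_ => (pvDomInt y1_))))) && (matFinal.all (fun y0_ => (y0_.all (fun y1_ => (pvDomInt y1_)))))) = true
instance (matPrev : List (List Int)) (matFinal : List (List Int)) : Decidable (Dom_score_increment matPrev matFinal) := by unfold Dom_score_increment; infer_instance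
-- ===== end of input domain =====

-- B sorts both flattened matrices and sums the unmatched prev values in one two-pointer
-- merge, instead of A's per-final-entry membership scan and list.remove (objective: faster).

-- ===== PORT A =====
-- flatten(mat) = [num for row in mat for num in row]
def pyFlatten (mat : List (List Int)) : List Int := mat.flatMap (fun row => row)

def score_increment (matPrev : List (List Int)) (matFinal : List (List Int)) : Int :=
  let first := pyFlatten matPrev
  let second := pyFlatten matFinal
  -- for i in second: if i in first and i != 0: first.remove(i)
  let first := second.foldl (fun f i =>
    if i ∈ f ∧ i ≠ 0 then (PySem.List.remove? f i).getD f else f) first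
  -- sumf = 0; for i in first: sumf += i
  first.foldl (fun sumf i => sumf + i) 0

-- ===== PORT B =====
-- the two while loops of Source B; advancing an index = dropping the head of the remaining suffix
def mergeSI : List Int → List Int → Int → Int
  | p::ps, q::qs, total =>
      if p < q then mergeSI ps (q::qs) (total + p)        -- prev[i] < fin[j]
      else if p = q then mergeSI ps qs total               -- matched: skip both
      else mergeSI (p::ps) qs total                        -- advance j
  | ps, [], total => ps.foldl (fun t v => t + v) total     -- while i < len(prev): total += prev[i]
  | [], _::_, total => total
termination_by ps qs _ => ps.length + qs.length

def score_increment_alt (matPrev : List (List Int)) (matFinal : List (List Int)) : Int :=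
  let prev := PySem.List.sorted (pyFlatten matPrev) (fun x => x) false
  let fin := PySem.List.sorted (pyFlatten matFinal) (fun x => x) false
  mergeSI prev fin 0

-- ===== PRECONDITION & SPEC =====
def Spec_score_increment (matPrev : List (List Int)) (matFinal : List (List Int)) (out : Int) : Prop := out = score_increment_alt matPrev matFinal
instance (matPrev : List (List Int)) (matFinal : List (List Int)) (out : Int) : Decidable (Spec_score_increment matPrev matFinal out) := by unfold Spec_score_increment; infer_instance

-- ===== CLAIM (what is proved, stated in full; the proofs are below) =====
def Claim_equal_score_increment : Prop := ∀ (matPrev : List (List Int)) (matFinal : List (List Int)), Dom_score_increment matPrev matFinal → Spec_score_increment matPrev matFinal (score_increment matPrev matFinal)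

-- ===== LEMMAS AND PROOFS =====

-- the total value removed from f by A's loop over s
def pvSub : List Int → List Int → Int
  | _, [] => 0
  | f, x::xs => if x ∈ f ∧ x ≠ 0 then x + pvSub (f.erase x) xs else pvSub f xs

theorem foldl_add_sum (l : List Int) (t : Int) :
    l.foldl (fun a b => a + b) t = t + l.sum := by
  induction l generalizing t with
  | nil => simp
  | cons x xs ih => rw [List.foldl_cons, ih, List.sum_cons]; ring

theorem pvSub_nil (s : List Int) : pvSub [] s = 0 := by
  induction s with
  | nil => rfl
  | cons x xs ih => simp [pvSub, ih]

theorem pvSub_cons_of_ne (a : Int) (f s : List Int) (h : ∀ x ∈ s, x ≠ a) :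
    pvSub (a::f) s = pvSub f s := by
  induction s generalizing f with
  | nil => rfl
  | cons x xs ih =>
    have hxa : x ≠ a := h x (by simp)
    have htail : ∀ y ∈ xs, y ≠ a := fun y hy => h y (by simp [hy])
    have he : (a::f).erase x = a :: f.erase x :=
      List.erase_cons_tail (by simpa using Ne.symm hxa)
    simp only [pvSub, List.mem_cons, hxa, false_or, he]
    split_ifs with hc
    · rw [ih _ htail]
    · exact ih _ htail

theorem pvSub_cons_zero (f s : List Int) : pvSub (0::f) s = pvSub f s := by
  induction s generalizing f with
  | nil => rfl
  | cons x xs ih =>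
    by_cases hx0 : x = 0
    · subst hx0; simp [pvSub, ih]
    · have he : ((0:Int)::f).erase x = 0 :: f.erase x :=
        List.erase_cons_tail (by simpa using Ne.symm hx0)
      by_cases hm : x ∈ f
      · simp only [pvSub]
        rw [if_pos ⟨by simp [hm], hx0⟩, if_pos ⟨hm, hx0⟩, he, ih]
      · simp only [pvSub]
        rw [if_neg (by simp [hm, hx0]), if_neg (by simp [hm]), ih]

theorem pvSub_perm_left (f f' s : List Int) (h : f.Perm f') : pvSub f s = pvSub f' s := by
  induction s generalizing f f' with
  | nil => rfl
  | cons x xs ih =>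
    simp only [pvSub, h.mem_iff]
    split_ifs with hc
    · rw [ih _ _ (h.erase x)]
    · exact ih _ _ h

theorem pvSub_perm_right (f s s' : List Int) (h : s.Perm s') : pvSub f s = pvSub f s' := by
  induction h generalizing f with
  | nil => rfl
  | cons x _ ih =>
    simp only [pvSub]
    split_ifs with hc
    · rw [ih]
    · exact ih _
  | swap x y l =>
    by_cases hxy : x = y
    · subst hxy; rfl
    · have hxy' : y ≠ x := Ne.symm hxy
      simp only [pvSub, List.mem_erase_of_ne hxy, List.mem_erase_of_ne hxy']
      by_cases hx : x ∈ f ∧ x ≠ 0 <;> by_cases hy : y ∈ f ∧ y ≠ 0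
      · rw [List.erase_comm y x (l := f)]
        simp [hx.1, hx.2, hy.1, hy.2, add_left_comm]
      · simp [hx, hy]
      · simp [hx, hy]
      · simp [hx, hy]
  | trans _ _ ih1 ih2 => rw [ih1, ih2]

theorem sumA (s f : List Int) :
    (s.foldl (fun f i => if i ∈ f ∧ i ≠ 0 then (PySem.List.remove? f i).getD f else f) f).sum
      = f.sum - pvSub f s := by
  induction s generalizing f with
  | nil => simp [pvSub]
  | cons x xs ih =>
    simp only [List.foldl_cons, pvSub]
    split_ifs with hc
    · rw [PySem.List.remove?_eq_some_erase f x hc.1, Option.getD_some, ih]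
      have := (List.perm_cons_erase hc.1).sum_eq
      simp only [List.sum_cons] at this
      omega
    · rw [ih]

theorem merge_eq (p q : List Int) (total : Int)
    (hp : p.Pairwise (· ≤ ·)) (hq : q.Pairwise (· ≤ ·)) :
    mergeSI p q total = total + p.sum - pvSub p q := by
  induction p, q, total using mergeSI.induct with
  | case1 a ps b qs total hlt ih =>
    have hforall : ∀ x ∈ b::qs, x ≠ a := by
      intro x hx
      rcases List.mem_cons.mp hx with h | h
      · omega
      · have := (List.pairwise_cons.mp hq).1 x h; omega
    rw [mergeSI, if_pos hlt, ih (List.pairwise_cons.mp hp).2 hq,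
      pvSub_cons_of_ne a ps (b::qs) hforall]
    simp; ring
  | case2 ps a qs total hlt ih =>
    rw [mergeSI, if_neg hlt, if_pos rfl,
      ih (List.pairwise_cons.mp hp).2 (List.pairwise_cons.mp hq).2]
    by_cases h0 : a = 0
    · subst h0
      have h1 : pvSub ((0:Int)::ps) (0::qs) = pvSub ps qs := by
        simp only [pvSub]; rw [if_neg (by simp), pvSub_cons_zero]
      rw [h1]; simp
    · have h1 : pvSub (a::ps) (a::qs) = a + pvSub ps qs := by
        simp only [pvSub]; rw [if_pos ⟨by simp, h0⟩, List.erase_cons_head]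
      rw [h1]; simp; ring
  | case3 a ps b qs total hlt hne ih =>
    have hbmem : b ∉ a::ps := by
      intro hmem
      rcases List.mem_cons.mp hmem with h | h
      · omega
      · have := (List.pairwise_cons.mp hp).1 b h; omega
    rw [mergeSI, if_neg hlt, if_neg hne, ih hp (List.pairwise_cons.mp hq).2]
    simp only [pvSub]
    rw [if_neg (by tauto)]
  | case4 ps total =>
    have h1 : pvSub ps [] = 0 := by cases ps <;> rfl
    rw [mergeSI, h1, foldl_add_sum]; ring
  | case5 b qs total => simp [mergeSI, pvSub_nil]

-- ===== VERDICT (by name: the statement is the Claim_ definition above) =====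
theorem score_increment_spec : Claim_equal_score_increment := by
  intro matPrev matFinal _
  unfold Spec_score_increment score_increment score_increment_alt
  rw [show (fun (sumf i : Int) => sumf + i) = (fun (a b : Int) => a + b) from rfl,
    foldl_add_sum, sumA]
  have hP := PySem.List.sorted_perm (pyFlatten matPrev) (fun x : Int => x) false
  have hF := PySem.List.sorted_perm (pyFlatten matFinal) (fun x : Int => x) false
  rw [merge_eq _ _ _
    (by simpa using PySem.List.sorted_pairwise (xs := pyFlatten matPrev) (key := fun x : Int => x))
    (by simpa using PySem.List.sorted_pairwise (xs := pyFlatten matFinal) (key := fun x : Int => x))]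
  rw [hP.sum_eq, pvSub_perm_left _ _ _ hP, pvSub_perm_right _ _ _ hF]
  ring
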